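-- pv_equiv track=rewrite | github.com/carrdelling/AdventOfCode2016 | day20/silver.py | solve
-- ===== SOURCE A (Python) =====
-- def solve(data):
--
--     valid = 0
--     for s, e in sorted(data):
--
--         if valid < s:
--             break
--
--         if valid < e:
--             valid = e + 1
--
--     solution = valid
--
--     return solution
-- ===== SOURCE B (Python) =====
-- def solve(data):
--     # Divide and conquer over the sorted intervals: each segment transforms an
--     # explicit (valid, broke) state; a leaf applies one interval, an inner node
--     # composes the two half-segment transformations.
--     intervals = sorted(data)
--
--     def scan(lo, hi, valid, broke):
--         if broke or lo >= hi:
--             return valid, broke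
--         if hi - lo == 1:
--             s, e = intervals[lo]
--             if valid < s:
--                 return valid, True
--             return (e + 1 if valid < e else valid), False
--         mid = (lo + hi) // 2
--         valid, broke = scan(lo, mid, valid, broke)
--         return scan(mid, hi, valid, broke)
--
--     return scan(0, len(intervals), 0, False)[0]
-- ===== Notes on version B (the rewrite author's own statement) =====
-- stated objective: alternative
-- what changed: A's linear for-loop over the sorted intervals with an implicit break is replaced by a recursive divide-and-conquer evaluation that threads an explicit (valid, broke) state through the two halves of each segment, with single-interval leaves.
import Mathlib
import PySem

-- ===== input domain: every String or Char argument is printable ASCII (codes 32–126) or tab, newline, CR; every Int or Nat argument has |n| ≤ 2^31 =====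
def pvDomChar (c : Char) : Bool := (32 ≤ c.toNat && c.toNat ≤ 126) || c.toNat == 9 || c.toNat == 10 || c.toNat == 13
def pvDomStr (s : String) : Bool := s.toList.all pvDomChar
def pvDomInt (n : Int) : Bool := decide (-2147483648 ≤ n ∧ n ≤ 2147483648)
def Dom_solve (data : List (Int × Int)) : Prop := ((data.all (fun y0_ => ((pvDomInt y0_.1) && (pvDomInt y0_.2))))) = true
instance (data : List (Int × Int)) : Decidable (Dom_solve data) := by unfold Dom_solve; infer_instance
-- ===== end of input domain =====

-- B replaces A's linear break-out loop over the sorted intervals by a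
-- divide-and-conquer evaluation threading an explicit (valid, broke) state;
-- same scan semantics, a different decomposition (not faster).

-- ===== PORT A =====
-- 'for s, e in sorted(data): if valid < s: break; if valid < e: valid = e + 1'
def aLoop : List (Int × Int) → Int → Int
  | [], valid => valid
  | (s, e) :: rest, valid =>
    if valid < s then valid
    else aLoop rest (if valid < e then e + 1 else valid)

def solve (data : List (Int × Int)) : Int :=
  aLoop (PySem.List.sorted2 data Prod.fst Prod.snd) 0

-- ===== PORT B =====
-- Source B's scan(lo, hi, valid, broke) works on the index range [lo, hi) of the
-- sorted list and splits it at mid = (lo + hi) // 2; the port carries the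
-- segment itself (take/drop at length / 2 is exactly the lo..mid/mid..hi split),
-- with the same (valid, broke) state and the same leaf computation.
def bScan : Nat → List (Int × Int) → Int × Bool → Int × Bool
  | 0, _, st => st  -- fuel only; never reached when fuel ≥ length of the segment
  | fuel + 1, l, st =>
    if st.2 then st
    else
      match l with
      | [] => st
      | [(s, e)] =>
        if st.1 < s then (st.1, true)
        else (if st.1 < e then e + 1 else st.1, false)
      | p :: q :: t =>
        bScan fuel ((p :: q :: t).drop ((p :: q :: t).length / 2))
          (bScan fuel ((p :: q :: t).take ((p :: q :: t).length / 2)) st)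

def solve_alt (data : List (Int × Int)) : Int :=
  (bScan (PySem.List.sorted2 data Prod.fst Prod.snd).length
    (PySem.List.sorted2 data Prod.fst Prod.snd) (0, false)).1

-- ===== PRECONDITION & SPEC =====
def Spec_solve (data : List (Int × Int)) (out : Int) : Prop := out = solve_alt data
instance (data : List (Int × Int)) (out : Int) : Decidable (Spec_solve data out) := by unfold Spec_solve; infer_instance

-- ===== CLAIM (what is proved, stated in full; the proofs are below) =====
def Claim_equal_solve : Prop := ∀ (data : List (Int × Int)), Dom_solve data → Spec_solve data (solve data)

-- ===== LEMMAS AND PROOFS =====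

-- one interval applied to a (valid, broke) state: the common step of both scans
def stepFn (st : Int × Bool) (p : Int × Int) : Int × Bool :=
  if st.2 then st
  else if st.1 < p.1 then (st.1, true)
  else (if st.1 < p.2 then p.2 + 1 else st.1, false)

lemma foldl_stepFn_broke (l : List (Int × Int)) (st : Int × Bool) (h : st.2 = true) :
    l.foldl stepFn st = st := by
  induction l with
  | nil => rfl
  | cons p t ih => simp [stepFn, h, ih]

lemma bScan_eq_foldl (fuel : Nat) (l : List (Int × Int)) (st : Int × Bool)
    (hf : l.length ≤ fuel) : bScan fuel l st = l.foldl stepFn st := by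
  induction fuel generalizing l st with
  | zero =>
    have : l = [] := List.eq_nil_of_length_eq_zero (by omega)
    subst this; rfl
  | succ fuel ih =>
    match l with
    | [] => simp [bScan]
    | [(s, e)] =>
      by_cases hb : st.2 = true
      · rw [foldl_stepFn_broke _ _ hb]; simp [bScan, hb]
      · simp_all [bScan, stepFn]
    | p :: q :: t =>
      by_cases hb : st.2 = true
      · rw [foldl_stepFn_broke _ _ hb]; simp [bScan, hb]
      · have hstep : bScan (fuel + 1) (p :: q :: t) st =
            bScan fuel ((p :: q :: t).drop ((p :: q :: t).length / 2))
              (bScan fuel ((p :: q :: t).take ((p :: q :: t).length / 2)) st) := by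
          simp [bScan, hb]
        rw [hstep,
          ih _ _ (by simp only [List.length_drop, List.length_cons] at hf ⊢; omega),
          ih _ _ (by simp only [List.length_take, List.length_cons] at hf ⊢; omega),
          ← List.foldl_append, List.take_append_drop]

lemma aLoop_eq_foldl (l : List (Int × Int)) (v : Int) :
    aLoop l v = (l.foldl stepFn (v, false)).1 := by
  induction l generalizing v with
  | nil => rfl
  | cons p t ih =>
    obtain ⟨s, e⟩ := p
    rw [aLoop, List.foldl_cons]
    split
    · rename_i hvs
      have hstep : stepFn (v, false) (s, e) = (v, true) := by
        simp [stepFn, hvs]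
      rw [hstep, foldl_stepFn_broke t (v, true) rfl]
    · rename_i hvs
      have hstep : stepFn (v, false) (s, e) = (if v < e then e + 1 else v, false) := by
        simp [stepFn, hvs]
      rw [hstep, ih]

-- ===== VERDICT (by name: the statement is the Claim_ definition above) =====
theorem solve_spec : Claim_equal_solve := by
  intro data _
  show aLoop (PySem.List.sorted2 data Prod.fst Prod.snd) 0 =
    (bScan (PySem.List.sorted2 data Prod.fst Prod.snd).length
      (PySem.List.sorted2 data Prod.fst Prod.snd) (0, false)).1
  rw [aLoop_eq_foldl, bScan_eq_foldl _ _ _ le_rfl]
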